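-- pv_equiv track=rewrite | github.com/pizzaburgare/grasp | preprocessing/analyze_exams.py | invert_to_topic_map
-- ===== SOURCE A (Python) =====
-- def invert_to_topic_map(
--     exam_topic_map: dict[str, list[str]], all_topics: list[str]
-- ) -> dict[str, list[str]]:
--     """Invert {exam_stem: [topics]} → {topic: [exam_dates]}."""
--     # Exam stems are like "2024_08_21"; convert to "2024-08-21"
--     result: dict[str, list[str]] = {topic: [] for topic in all_topics}
--     for exam_stem, topics in exam_topic_map.items():
--         date = exam_stem.replace("_", "-")
--         for topic in topics:
--             if topic in result:
--                 result[topic].append(date)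
--     return result
-- ===== SOURCE B (Python) =====
-- def invert_to_topic_map(
--     exam_topic_map: dict[str, list[str]], all_topics: list[str]
-- ) -> dict[str, list[str]]:
--     """Invert {exam_stem: [topics]} -> {topic: [exam_dates]} by scanning the
--     whole map once per topic (dict comprehension) instead of mutating a seeded dict."""
--     return {
--         topic: [
--             exam_stem.replace("_", "-")
--             for exam_stem, topics in exam_topic_map.items()
--             for t in topics
--             if t == topic
--         ]
--         for topic in all_topics
--     }
-- ===== Notes on version B (the rewrite author's own statement) =====
-- stated objective: simpler
-- what changed: Replaces A's seeded dict mutated by one forward pass over the exam map with a single dict comprehension that builds each topic's date list by rescanning the whole exam map per topic (inverted loop nesting, no mutation).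
import Mathlib
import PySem

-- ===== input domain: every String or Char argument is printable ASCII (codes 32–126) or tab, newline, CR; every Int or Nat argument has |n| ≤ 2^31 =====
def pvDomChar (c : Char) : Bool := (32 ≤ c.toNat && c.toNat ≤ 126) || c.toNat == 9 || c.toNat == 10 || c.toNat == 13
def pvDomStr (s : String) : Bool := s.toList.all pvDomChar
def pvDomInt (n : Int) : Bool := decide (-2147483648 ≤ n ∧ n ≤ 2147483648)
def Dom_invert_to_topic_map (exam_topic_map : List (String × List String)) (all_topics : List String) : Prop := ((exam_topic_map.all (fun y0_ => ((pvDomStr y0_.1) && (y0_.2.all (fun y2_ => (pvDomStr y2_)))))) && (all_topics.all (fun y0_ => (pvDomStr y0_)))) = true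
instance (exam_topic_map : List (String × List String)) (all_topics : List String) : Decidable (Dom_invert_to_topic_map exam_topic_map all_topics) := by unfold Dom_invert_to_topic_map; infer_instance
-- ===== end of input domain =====

-- B replaces A's seeded dict mutated by a forward pass with a per-topic dict
-- comprehension that rescans the whole map (simpler, no mutation; not faster).

-- ===== PORT A =====
def invert_to_topic_map (exam_topic_map : List (String × List String)) (all_topics : List String) : List (String × List String) :=
  let result : PySem.Dict String (List String) :=
    all_topics.foldl (fun d topic => d.insert topic []) PySem.Dict.empty
  let result := exam_topic_map.foldl (fun d p =>
    let date := PySem.Str.replace p.1 "_" "-"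
    p.2.foldl (fun d topic =>
      if d.contains topic then d.modify topic [] (fun l => l ++ [date]) else d) d) result
  result.items

-- ===== PORT B =====
def invert_to_topic_map_alt (exam_topic_map : List (String × List String)) (all_topics : List String) : List (String × List String) :=
  (PySem.List.dedup all_topics).map (fun topic =>
    (topic, exam_topic_map.flatMap (fun p =>
      (p.2.filter (fun t => t == topic)).map (fun _ => PySem.Str.replace p.1 "_" "-"))))

-- ===== PRECONDITION & SPEC =====
def Spec_invert_to_topic_map (exam_topic_map : List (String × List String)) (all_topics : List String) (out : List (String × List String)) : Prop := out = invert_to_topic_map_alt exam_topic_map all_topics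
instance (exam_topic_map : List (String × List String)) (all_topics : List String) (out : List (String × List String)) : Decidable (Spec_invert_to_topic_map exam_topic_map all_topics out) := by unfold Spec_invert_to_topic_map; infer_instance

-- ===== CLAIM (what is proved, stated in full; the proofs are below) =====
def Claim_equal_invert_to_topic_map : Prop := ∀ (exam_topic_map : List (String × List String)) (all_topics : List String), Dom_invert_to_topic_map exam_topic_map all_topics → Spec_invert_to_topic_map exam_topic_map all_topics (invert_to_topic_map exam_topic_map all_topics)

-- ===== LEMMAS AND PROOFS =====

-- A's inner loop over one exam's topic list.
def pvInner (date : String) (ts : List String) (d : PySem.Dict String (List String)) : PySem.Dict String (List String) :=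
  ts.foldl (fun d topic =>
    if d.contains topic then d.modify topic [] (fun l => l ++ [date]) else d) d

lemma pvInner_keys (date : String) (ts : List String) (d : PySem.Dict String (List String)) :
    (pvInner date ts d).keys = d.keys := by
  induction ts generalizing d with
  | nil => rfl
  | cons t ts ih =>
      simp only [pvInner, List.foldl_cons] at *
      split_ifs with hc
      · rw [ih, PySem.Dict.keys_modify, PySem.Dict.keys_insert_of_contains _ _ hc]
      · exact ih d

lemma pvInner_getD (date : String) (ts : List String) (d : PySem.Dict String (List String))
    (k : String) (hk : k ∈ d.keys) :
    (pvInner date ts d).getD k [] = d.getD k [] ++ (ts.filter (fun t => t == k)).map (fun _ => date) := by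
  induction ts generalizing d with
  | nil => simp [pvInner]
  | cons t ts ih =>
      simp only [pvInner, List.foldl_cons] at *
      by_cases hc : d.contains t = true
      · rw [if_pos hc]
        have hk' : k ∈ (d.modify t [] (fun l => l ++ [date])).keys := by
          rw [PySem.Dict.keys_modify]
          exact (PySem.Dict.mem_keys_insert _ _ _ _).mpr (Or.inr hk)
        rw [ih _ hk']
        by_cases hkt : t = k
        · subst hkt
          simp [PySem.Dict.getD_modify_self]
        · rw [PySem.Dict.getD_modify_of_ne d [] _ (Ne.symm hkt)]
          have : (t == k) = false := beq_false_of_ne hkt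
          simp [this]
      · rw [if_neg hc]
        have hkt : (t == k) = false := by
          apply beq_false_of_ne
          intro h; subst h
          exact hc ((PySem.Dict.contains_iff_mem_keys _ _).mpr hk)
        rw [ih _ hk]
        simp [hkt]

-- A's outer loop over the exam map.
def pvOuter (etm : List (String × List String)) (d : PySem.Dict String (List String)) : PySem.Dict String (List String) :=
  etm.foldl (fun d p => pvInner (PySem.Str.replace p.1 "_" "-") p.2 d) d

lemma pvOuter_keys (etm : List (String × List String)) (d : PySem.Dict String (List String)) :
    (pvOuter etm d).keys = d.keys := by
  induction etm generalizing d with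
  | nil => rfl
  | cons p etm ih => simp only [pvOuter, List.foldl_cons] at *; rw [ih, pvInner_keys]

lemma pvOuter_getD (etm : List (String × List String)) (d : PySem.Dict String (List String))
    (k : String) (hk : k ∈ d.keys) :
    (pvOuter etm d).getD k [] = d.getD k [] ++ etm.flatMap (fun p =>
      (p.2.filter (fun t => t == k)).map (fun _ => PySem.Str.replace p.1 "_" "-")) := by
  induction etm generalizing d with
  | nil => simp [pvOuter]
  | cons p etm ih =>
      simp only [pvOuter, List.foldl_cons] at *
      have hk' : k ∈ (pvInner (PySem.Str.replace p.1 "_" "-") p.2 d).keys := by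
        rw [pvInner_keys]; exact hk
      rw [ih _ hk', pvInner_getD _ _ _ _ hk, List.flatMap_cons, List.append_assoc]

-- The seeded dict: keys are all_topics deduped, all values [].
def pvInit (ats : List String) : PySem.Dict String (List String) :=
  ats.foldl (fun d topic => d.insert topic []) PySem.Dict.empty

lemma pvInit_keys (ats : List String) : (pvInit ats).keys = PySem.List.dedup ats := by
  simpa [pvInit] using PySem.Dict.keys_foldl_insert ats (fun _ _ => ([] : List String)) PySem.Dict.empty

lemma pvInit_nodup (ats : List String) : (pvInit ats).keys.Nodup := by
  exact PySem.Dict.nodup_keys_foldl_insert ats _ _ (by simp [PySem.Dict.keys_empty])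

lemma pvInit_getD (ats : List String) (k : String) : (pvInit ats).getD k [] = [] := by
  suffices h : ∀ d : PySem.Dict String (List String), d.getD k [] = [] →
      (ats.foldl (fun d topic => d.insert topic []) d).getD k [] = [] by
    exact h PySem.Dict.empty (by simp [PySem.Dict.getD_empty])
  induction ats with
  | nil => intro d hd; simpa using hd
  | cons t ts ih =>
      intro d hd
      refine ih _ ?_
      by_cases h : k = t
      · subst h; simp [PySem.Dict.getD_insert_self]
      · rw [PySem.Dict.getD_insert_of_ne d ([] : List String) ([] : List String) h]; exact hd

-- ===== VERDICT (by name: the statement is the Claim_ definition above) =====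
theorem invert_to_topic_map_spec : Claim_equal_invert_to_topic_map := by
  intro etm ats _
  show invert_to_topic_map etm ats = invert_to_topic_map_alt etm ats
  have hkeys : (pvOuter etm (pvInit ats)).keys = PySem.List.dedup ats := by
    rw [pvOuter_keys, pvInit_keys]
  have hnd : (pvOuter etm (pvInit ats)).keys.Nodup := by
    rw [pvOuter_keys]; exact pvInit_nodup ats
  have : invert_to_topic_map etm ats = (pvOuter etm (pvInit ats)).items := rfl
  rw [this, PySem.Dict.items_eq_map_keys _ hnd ([] : List String), hkeys,
    invert_to_topic_map_alt]
  apply List.map_congr_left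
  intro k hk
  have hk' : k ∈ (pvInit ats).keys := by rw [pvInit_keys]; exact hk
  rw [pvOuter_getD etm _ k hk', pvInit_getD]
  simp
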